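-- pv_equiv track=rewrite | github.com/poojasheggari2/SKILL-ANALYSER-AND-CAREER-ENHANCER | SKILL GAP ANALYZER/utils/reterive_output.py | filter_indices_by_skills
-- ===== SOURCE A (Python) =====
-- def filter_indices_by_skills(skills, required_skills):
--     """
--     Return a list of indices where any required skill is present.
--     Each element in `skills` is assumed to be a list of strings.
--     """
--     allowed_idx = []
--     for i, skill_list in enumerate(skills):
--         for req in required_skills:
--             if req in skill_list:
--                 allowed_idx.append(i)
--                 break  # Once found, move to next document
--     return allowed_idx
-- ===== SOURCE B (Python) =====
-- def filter_indices_by_skills(skills, required_skills):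
--     """
--     Return a list of indices where any required skill is present.
--     Inverted index: skill -> list of document indices, then gather and sort.
--     """
--     index = {}
--     for i, skill_list in enumerate(skills):
--         for s in skill_list:
--             index.setdefault(s, []).append(i)
--     hits = set()
--     for req in required_skills:
--         for i in index.get(req, []):
--             hits.add(i)
--     return sorted(hits)
-- ===== Notes on version B (the rewrite author's own statement) =====
-- stated objective: alternative
-- what changed: Replaces the per-document rescan of required_skills (with break) by an inverted index skill->indices built in one pass, a gather over required_skills into a set, and a final sort.
import Mathlib
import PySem

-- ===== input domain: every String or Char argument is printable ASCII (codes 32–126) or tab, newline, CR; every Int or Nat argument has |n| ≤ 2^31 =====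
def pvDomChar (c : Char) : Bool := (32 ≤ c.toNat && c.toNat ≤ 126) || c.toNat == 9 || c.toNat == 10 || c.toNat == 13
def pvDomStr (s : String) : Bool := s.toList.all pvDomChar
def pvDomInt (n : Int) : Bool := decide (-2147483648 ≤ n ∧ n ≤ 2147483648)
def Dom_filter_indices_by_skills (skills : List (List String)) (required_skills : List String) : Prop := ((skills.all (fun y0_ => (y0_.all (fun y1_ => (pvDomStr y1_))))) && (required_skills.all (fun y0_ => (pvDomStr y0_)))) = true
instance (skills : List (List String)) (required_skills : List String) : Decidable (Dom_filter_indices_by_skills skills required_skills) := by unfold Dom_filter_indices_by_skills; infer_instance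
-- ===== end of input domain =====

-- B replaces A's per-document rescan of required_skills by an inverted index
-- (skill -> document indices) plus a set gather and a sort (objective: alternative).

-- ===== PORT A =====
-- inner 'for req in required_skills: if req in skill_list: append; break' — true iff some req hits
def pvHitA : List String → List String → Bool
  | [], _ => false
  | r :: rest, sl => if sl.contains r then true else pvHitA rest sl

def filter_indices_by_skills (skills : List (List String)) (required_skills : List String) : List Int :=
  (PySem.List.enumerate skills 0).foldl
    (fun acc p => if pvHitA required_skills p.2 then acc ++ [p.1] else acc) []

-- ===== PORT B =====
def filter_indices_by_skills_alt (skills : List (List String)) (required_skills : List String) : List Int :=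
  let index : PySem.Dict String (List Int) :=
    (PySem.List.enumerate skills 0).foldl
      (fun d p => p.2.foldl (fun d s => d.modify s [] (· ++ [p.1])) d) PySem.Dict.empty
  let hits : PySem.Set Int :=
    required_skills.foldl (fun s req => (index.getD req []).foldl PySem.Set.add s) PySem.Set.empty
  PySem.List.sorted hits (fun x => x) false

-- ===== PRECONDITION & SPEC =====
def Spec_filter_indices_by_skills (skills : List (List String)) (required_skills : List String) (out : List Int) : Prop := out = filter_indices_by_skills_alt skills required_skills
instance (skills : List (List String)) (required_skills : List String) (out : List Int) : Decidable (Spec_filter_indices_by_skills skills required_skills out) := by unfold Spec_filter_indices_by_skills; infer_instance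

-- ===== CLAIM (what is proved, stated in full; the proofs are below) =====
def Claim_equal_filter_indices_by_skills : Prop := ∀ (skills : List (List String)) (required_skills : List String), Dom_filter_indices_by_skills skills required_skills → Spec_filter_indices_by_skills skills required_skills (filter_indices_by_skills skills required_skills)

-- ===== LEMMAS AND PROOFS =====

theorem pvHitA_iff (reqs sl : List String) :
    pvHitA reqs sl = true ↔ ∃ r ∈ reqs, r ∈ sl := by
  induction reqs with
  | nil => simp [pvHitA]
  | cons r rest ih =>
      by_cases h : sl.contains r
      · simp_all [pvHitA]
      · simp_all [pvHitA]

-- the flat (skill, index) pair list B's index is built from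
def pvPairs (skills : List (List String)) : List (String × Int) :=
  (PySem.List.enumerate skills 0).flatMap (fun p => p.2.map (fun s => (s, p.1)))

theorem pvIndex_eq_gen (l : List (Int × List String)) (d : PySem.Dict String (List Int)) :
    l.foldl (fun d p => p.2.foldl (fun d s => d.modify s [] (· ++ [p.1])) d) d
    = (l.flatMap (fun p => p.2.map (fun s => (s, p.1)))).foldl
        (fun d q => d.modify q.1 [] (· ++ [q.2])) d := by
  induction l generalizing d with
  | nil => simp
  | cons p t ih =>
      simp only [List.flatMap_cons, List.foldl_cons, List.foldl_append, List.foldl_map, ih]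

theorem pvIndex_eq (skills : List (List String)) :
    (PySem.List.enumerate skills 0).foldl
      (fun d p => p.2.foldl (fun d s => d.modify s [] (· ++ [p.1])) d) PySem.Dict.empty
    = (pvPairs skills).foldl (fun d q => d.modify q.1 [] (· ++ [q.2])) PySem.Dict.empty :=
  pvIndex_eq_gen _ _

theorem pvGetD_index (skills : List (List String)) (req : String) :
    (((pvPairs skills).foldl (fun d q => d.modify q.1 [] (· ++ [q.2])) PySem.Dict.empty).getD req [])
    = (((pvPairs skills).filter (fun q => q.1 == req)).map (·.2)) := by
  rw [PySem.Dict.getD_foldl_modify_append]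
  simp

theorem pvMem_getD_index (skills : List (List String)) (req : String) (i : Int) :
    (i ∈ (((pvPairs skills).filter (fun q => q.1 == req)).map (·.2)))
    ↔ ∃ (k : Nat) (h : k < skills.length), i = (k : Int) ∧ req ∈ skills[k] := by
  simp only [List.mem_map, List.mem_filter, pvPairs, List.mem_flatMap,
    PySem.List.mem_enumerate_iff]
  constructor
  · rintro ⟨⟨s, ik⟩, ⟨⟨p, ⟨k, hk, rfl⟩, hmem⟩, hbeq⟩, rfl⟩
    obtain ⟨s', hs', hp⟩ := hmem
    cases hp
    exact ⟨k, hk, by simp, by simpa [← (by exact (beq_iff_eq).mp hbeq : s = req)] using hs'⟩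
  · rintro ⟨k, hk, rfl, hreq⟩
    refine ⟨(req, 0 + (k : Int)),
      ⟨⟨(0 + (k : Int), skills[k]), ⟨k, hk, rfl⟩,
        ⟨req, hreq, rfl⟩⟩, by simp⟩, by simp⟩

theorem pvMem_hits (skills : List (List String)) (reqs : List String) (s0 : List Int) (i : Int) :
    i ∈ reqs.foldl (fun s req =>
        ((((pvPairs skills).foldl (fun d q => d.modify q.1 [] (· ++ [q.2])) PySem.Dict.empty).getD req []).foldl PySem.Set.add s)) s0
    ↔ i ∈ s0 ∨ ∃ req ∈ reqs, ∃ (k : Nat) (h : k < skills.length), i = (k : Int) ∧ req ∈ skills[k] := by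
  induction reqs generalizing s0 with
  | nil => simp
  | cons r rest ih =>
      simp only [List.foldl_cons, ih]
      have hupd : ∀ (t : List Int) (xs : List Int),
          i ∈ xs.foldl PySem.Set.add t ↔ i ∈ t ∨ i ∈ xs := by
        intro t xs
        exact PySem.Set.mem_update (s := t) (xs := xs) (y := i)
      rw [hupd, pvGetD_index, pvMem_getD_index]
      constructor
      · rintro (⟨h | h⟩ | h)
        · exact Or.inl h
        · exact Or.inr ⟨r, by simp, h⟩
        · obtain ⟨req, h1, h2⟩ := h; exact Or.inr ⟨req, by simp [h1], h2⟩
      · rintro (h | ⟨req, hreq, h2⟩)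
        · exact Or.inl (Or.inl h)
        · rcases List.mem_cons.mp hreq with rfl | hreq
          · exact Or.inl (Or.inr h2)
          · exact Or.inr ⟨req, hreq, h2⟩

theorem pvHits_nodup (skills : List (List String)) (reqs : List String) (s0 : List Int)
    (h0 : s0.Nodup) :
    (reqs.foldl (fun s req =>
        ((((pvPairs skills).foldl (fun d q => d.modify q.1 [] (· ++ [q.2])) PySem.Dict.empty).getD req []).foldl PySem.Set.add s)) s0).Nodup := by
  induction reqs generalizing s0 with
  | nil => exact h0
  | cons r rest ih =>
      exact ih _ (PySem.Set.nodup_update s0 _ h0)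

theorem pvA_eq_filter (skills : List (List String)) (reqs : List String) :
    filter_indices_by_skills skills reqs
    = ((PySem.List.enumerate skills 0).filter (fun p => pvHitA reqs p.2)).map (·.1) := by
  unfold filter_indices_by_skills
  exact PySem.List.foldl_append_if (fun p => pvHitA reqs p.2) (fun p => p.1)
    (PySem.List.enumerate skills 0) []

theorem pvMem_A (skills : List (List String)) (reqs : List String) (i : Int) :
    i ∈ filter_indices_by_skills skills reqs
    ↔ ∃ (k : Nat) (h : k < skills.length), i = (k : Int) ∧ ∃ r ∈ reqs, r ∈ skills[k] := by
  rw [pvA_eq_filter]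
  simp only [List.mem_map, List.mem_filter, PySem.List.mem_enumerate_iff]
  constructor
  · rintro ⟨p, ⟨⟨k, hk, rfl⟩, hhit⟩, rfl⟩
    exact ⟨k, hk, by simp, by simpa using (pvHitA_iff reqs skills[k]).mp (by simpa using hhit)⟩
  · rintro ⟨k, hk, rfl, hex⟩
    exact ⟨((k : Int) + 0, skills[k]), ⟨⟨k, hk, by simp⟩, (pvHitA_iff reqs skills[k]).mpr hex⟩, by simp⟩

theorem pvA_pairwise (skills : List (List String)) (reqs : List String) :
    (filter_indices_by_skills skills reqs).Pairwise (· < ·) := by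
  rw [pvA_eq_filter]
  exact List.Pairwise.map _ (fun a b h => h)
    (List.Pairwise.filter _ (PySem.List.pairwise_lt_enumerate skills 0))

theorem pvA_nodup (skills : List (List String)) (reqs : List String) :
    (filter_indices_by_skills skills reqs).Nodup :=
  (pvA_pairwise skills reqs).imp (fun h => ne_of_lt h)

-- ===== VERDICT (by name: the statement is the Claim_ definition above) =====
theorem filter_indices_by_skills_spec : Claim_equal_filter_indices_by_skills := by
  intro skills reqs _
  unfold Spec_filter_indices_by_skills filter_indices_by_skills_alt
  rw [pvIndex_eq]
  symm
  apply PySem.List.sorted_eq_of_perm_of_pairwise_lt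
  · refine (List.perm_ext_iff_of_nodup (pvA_nodup skills reqs)
      (pvHits_nodup skills reqs PySem.Set.empty List.nodup_nil)).mpr ?_
    intro i
    rw [pvMem_A, pvMem_hits]
    constructor
    · rintro ⟨k, hk, rfl, r, hr, hmem⟩
      exact Or.inr ⟨r, hr, k, hk, rfl, hmem⟩
    · rintro (h | ⟨r, hr, k, hk, rfl, hmem⟩)
      · simp [PySem.Set.empty] at h
      · exact ⟨k, hk, rfl, r, hr, hmem⟩
  · exact pvA_pairwise skills reqs
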